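-- pv_equiv track=rewrite | github.com/deeyanvadwala/Semantic-Code-Search-and-Recommendation-Using-Neural-Embeddings | evaluation/__init__.py | frank
-- ===== SOURCE A (Python) =====
-- from typing import List, Dict, Optional
--
-- def frank(
--     retrieved_ids: List[int],
--     relevant_ids: List[int]
-- ) -> Optional[int]:
--     """
--     FRank: rank of the first relevant result (1-indexed).
--
--     Returns None if no relevant result found (NF in the paper).
--     """
--     relevant = set(relevant_ids)
--
--     for i, rid in enumerate(retrieved_ids):
--         if rid in relevant:
--             return i + 1
--
--     return None
-- ===== SOURCE B (Python) =====
-- def frank(retrieved_ids, relevant_ids):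
--     """FRank via a first-occurrence position table over retrieved_ids."""
--     pos = {}
--     for i, rid in enumerate(retrieved_ids):
--         if rid not in pos:
--             pos[rid] = i
--     ranks = [pos[rid] + 1 for rid in relevant_ids if rid in pos]
--     return min(ranks) if ranks else None
-- ===== Notes on version B (the rewrite author's own statement) =====
-- stated objective: alternative
-- what changed: B scans relevant_ids against a prebuilt first-index dict of retrieved_ids and takes the minimum rank, instead of scanning retrieved_ids for the first membership hit in a set of relevant_ids.
import Mathlib
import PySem

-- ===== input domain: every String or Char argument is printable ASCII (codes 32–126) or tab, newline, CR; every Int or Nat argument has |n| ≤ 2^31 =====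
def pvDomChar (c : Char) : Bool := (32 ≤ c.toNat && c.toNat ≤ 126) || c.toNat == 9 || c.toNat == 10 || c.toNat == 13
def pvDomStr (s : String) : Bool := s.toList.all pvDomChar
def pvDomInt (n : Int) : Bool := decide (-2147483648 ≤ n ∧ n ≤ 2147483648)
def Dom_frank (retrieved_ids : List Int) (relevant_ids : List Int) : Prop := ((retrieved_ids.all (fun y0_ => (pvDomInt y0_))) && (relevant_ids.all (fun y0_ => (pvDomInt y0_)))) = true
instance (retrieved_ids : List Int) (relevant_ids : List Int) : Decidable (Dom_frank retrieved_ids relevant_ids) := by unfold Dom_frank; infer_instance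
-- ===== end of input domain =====

-- B builds a first-occurrence index dict over retrieved_ids and takes the minimum rank over relevant_ids, instead of A's scan of retrieved_ids for the first hit in a set of relevant_ids; proved to return the same value on all inputs.


-- ===== PORT A =====
-- the 'for i, rid in enumerate(retrieved_ids): if rid in relevant: return i + 1' loop
def frankLoop (relevant : PySem.Set Int) : List (Int × Int) → Option Int
  | [] => none
  | (i, rid) :: rest =>
      if relevant.contains rid then some (i + 1) else frankLoop relevant rest

def frank (retrieved_ids : List Int) (relevant_ids : List Int) : Option Int :=
  let relevant := PySem.Set.ofList relevant_ids
  frankLoop relevant (PySem.List.enumerate retrieved_ids 0)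

-- ===== PORT B =====
def frank_alt (retrieved_ids : List Int) (relevant_ids : List Int) : Option Int :=
  -- pos = {}; for i, rid in enumerate(retrieved_ids): if rid not in pos: pos[rid] = i
  let pos := (PySem.List.enumerate retrieved_ids 0).foldl
    (fun d p => if d.contains p.2 then d else d.insert p.2 p.1) PySem.Dict.empty
  -- ranks = [pos[rid] + 1 for rid in relevant_ids if rid in pos]
  let ranks := relevant_ids.filterMap (fun rid => (pos.get? rid).map (fun i => i + 1))
  -- return min(ranks) if ranks else None
  if ranks = [] then none else PySem.List.min? ranks (fun y => y)

-- ===== PRECONDITION & SPEC =====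
def Spec_frank (retrieved_ids : List Int) (relevant_ids : List Int) (out : Option Int) : Prop := out = frank_alt retrieved_ids relevant_ids
instance (retrieved_ids : List Int) (relevant_ids : List Int) (out : Option Int) : Decidable (Spec_frank retrieved_ids relevant_ids out) := by unfold Spec_frank; infer_instance

-- ===== CLAIM (what is proved, stated in full; the proofs are below) =====
def Claim_equal_frank : Prop := ∀ (retrieved_ids : List Int) (relevant_ids : List Int), Dom_frank retrieved_ids relevant_ids → Spec_frank retrieved_ids relevant_ids (frank retrieved_ids relevant_ids)

-- ===== LEMMAS AND PROOFS =====

-- the position dict looks up the first index (offset by the start) of a key, unless already bound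
theorem pos_get (xs : List Int) (n : Int) (d : PySem.Dict Int Int) (r : Int) :
    ((PySem.List.enumerate xs n).foldl
      (fun d p => if d.contains p.2 then d else d.insert p.2 p.1) d).get? r
    = (d.get? r).or ((xs.idxOf? r).map (fun k : Nat => n + (k : Int))) := by
  induction xs generalizing n d with
  | nil => simp [PySem.List.enumerate_nil]
  | cons x t ih =>
    rw [PySem.List.enumerate_cons, List.foldl_cons]
    by_cases hc : d.contains x
    · simp only [hc, if_true, ih]
      rw [List.idxOf?_cons]
      by_cases hx : x = r
      · subst hx
        have hs : (d.get? x).isSome := by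
          rw [← PySem.Dict.contains_eq_isSome_get?]; exact hc
        rcases Option.isSome_iff_exists.mp hs with ⟨v, hv⟩
        simp [hv]
      · rw [if_neg (by simpa using hx)]
        congr 1
        cases t.idxOf? r with
        | none => simp
        | some k => simp; omega
    · simp only [hc, Bool.false_eq_true, if_false, ih]
      rw [List.idxOf?_cons]
      by_cases hx : x = r
      · subst hx
        have hdn : d.get? x = none := by
          rw [Option.eq_none_iff_forall_ne_some]
          intro v hv
          have hce := PySem.Dict.contains_eq_isSome_get? (d := d) (k := x)
          rw [hv] at hce; simp [hce] at hc
        rw [PySem.Dict.get?_insert, if_pos rfl, hdn]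
        simp
      · rw [PySem.Dict.get?_insert, if_neg (fun h => hx h.symm),
            if_neg (by simpa using hx)]
        congr 1
        cases t.idxOf? r with
        | none => simp
        | some k => simp; omega

-- A's loop is findIdx? over the underlying list, shifted by the enumeration start
theorem frankLoop_eq (s : PySem.Set Int) (xs : List Int) (n : Int) :
    frankLoop s (PySem.List.enumerate xs n)
    = (xs.findIdx? (fun x => s.contains x)).map (fun k : Nat => n + (k : Int) + 1) := by
  induction xs generalizing n with
  | nil => simp [PySem.List.enumerate_nil, frankLoop]
  | cons x t ih =>
    rw [PySem.List.enumerate_cons, List.findIdx?_cons]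
    by_cases hc : s.contains x = true
    · have hm : x ∈ s := (PySem.Set.contains_iff s x).mp hc
      rw [if_pos hc]
      simp [frankLoop, hm]
    · rw [if_neg hc]
      show (if s.contains x = true then some (n + 1)
            else frankLoop s (PySem.List.enumerate t (n + 1))) = _
      rw [if_neg hc, ih]
      cases t.findIdx? (fun x => s.contains x) with
      | none => rfl
      | some k =>
        simp only [Option.map_some]
        congr 1
        push_cast
        ring

-- if m is in L and below every element, min? (first minimal) returns exactly m
theorem min?_id_eq (L : List Int) (m : Int) (hm : m ∈ L) (hle : ∀ y ∈ L, m ≤ y) :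
    PySem.List.min? L (fun y => y) = some m := by
  cases h : PySem.List.min? L (fun y => y) with
  | none =>
    rw [PySem.List.min?_eq_none_iff] at h
    subst h; cases hm
  | some m' =>
    have h2 : m' ≤ m := PySem.List.min?_isMin h m hm
    have h3 : m ≤ m' := hle m' (PySem.List.min?_mem h)
    exact congrArg some (le_antisymm h2 h3)

-- the crux: the minimum rank over relevant_ids equals the first index hit, for any strictly monotone rank map
theorem min_filterMap_idxOf (xs : List Int) (rel : List Int) (f : Nat → Int)
    (hf : StrictMono f) :
    PySem.List.min? (rel.filterMap (fun r => (xs.idxOf? r).map f)) (fun y => y)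
    = (xs.findIdx? (fun x => decide (x ∈ rel))).map f := by
  induction xs generalizing f with
  | nil => simp
  | cons x t ih =>
    rw [List.findIdx?_cons]
    by_cases hx : x ∈ rel
    · rw [if_pos (by simpa using hx)]
      apply min?_id_eq
      · refine List.mem_filterMap.mpr ⟨x, hx, ?_⟩
        rw [List.idxOf?_cons, if_pos (by simp)]
        rfl
      · intro y hy
        rcases List.mem_filterMap.mp hy with ⟨r, _, hr⟩
        rcases Option.map_eq_some_iff.mp hr with ⟨k, _, rfl⟩
        exact hf.monotone (Nat.zero_le k)
    · rw [if_neg (by simpa using hx)]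
      have hcongr : rel.filterMap (fun r => ((x :: t).idxOf? r).map f)
          = rel.filterMap (fun r => (t.idxOf? r).map (fun k => f (k + 1))) := by
        apply List.filterMap_congr
        intro r hr
        rw [List.idxOf?_cons, if_neg (by simp; rintro rfl; exact hx hr), Option.map_map]
        rfl
      rw [hcongr, ih (fun k => f (k + 1)) (fun a b h => hf (by omega)), Option.map_map]
      rfl

theorem frank_eq_frank_alt (xs : List Int) (rel : List Int) :
    frank xs rel = frank_alt xs rel := by
  have hmono : StrictMono (fun k : Nat => (k : Int) + 1) := fun a b h => by
    dsimp only; omega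
  have hpred : (fun x => (PySem.Set.ofList rel).contains x) = (fun x => decide (x ∈ rel)) := by
    funext x
    by_cases hx : x ∈ rel
    · have hc : (PySem.Set.ofList rel).contains x = true :=
        (PySem.Set.contains_iff _ _).mpr ((PySem.Set.mem_ofList _ _).mpr hx)
      rw [hc]; simp [hx]
    · have hc : (PySem.Set.ofList rel).contains x = false := by
        rcases Bool.eq_false_or_eq_true ((PySem.Set.ofList rel).contains x) with h | h
        · exact absurd ((PySem.Set.mem_ofList _ _).mp ((PySem.Set.contains_iff _ _).mp h)) hx
        · exact h
      rw [hc]; simp [hx]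
  have hranks : rel.filterMap (fun rid =>
      (((PySem.List.enumerate xs 0).foldl
        (fun d p => if d.contains p.2 then d else d.insert p.2 p.1)
        PySem.Dict.empty).get? rid).map (fun i => i + 1))
      = rel.filterMap (fun r => (xs.idxOf? r).map (fun k : Nat => (k : Int) + 1)) := by
    apply List.filterMap_congr
    intro r _
    rw [pos_get, PySem.Dict.get?_empty, Option.none_or, Option.map_map]
    cases xs.idxOf? r <;> simp
  have hsimpl : (xs.findIdx? (fun x => decide (x ∈ rel))).map
        (fun k : Nat => (0 : Int) + (k : Int) + 1)
      = (xs.findIdx? (fun x => decide (x ∈ rel))).map (fun k : Nat => (k : Int) + 1) := by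
    cases xs.findIdx? (fun x => decide (x ∈ rel)) <;> simp
  simp only [frank, frank_alt]
  rw [frankLoop_eq, hpred, hsimpl, hranks, ← min_filterMap_idxOf xs rel _ hmono]
  by_cases hnil : rel.filterMap (fun r => (xs.idxOf? r).map (fun k : Nat => (k : Int) + 1)) = []
  · rw [if_pos hnil, hnil]
    rfl
  · rw [if_neg hnil]

-- ===== VERDICT (by name: the statement is the Claim_ definition above) =====
theorem frank_spec : Claim_equal_frank := by
  intro xs rel _
  unfold Spec_frank
  exact frank_eq_frank_alt xs rel
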